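-- pv_equiv track=rewrite | github.com/daniel-reich/ubiquitous-fiesta | WixXhsdqcNHe3vTn3_4.py | how_bad
-- ===== SOURCE A (Python) =====
-- def how_bad(n):
--     a=bin(n)
--     count=0
--     for i in str(a):
--         if i=='1':
--             count+=1
--     x=['Evil' if count%2==0 else "Odious" ]
--     y=['t' if count%i==0 else 'f' for i in range(2,count)]
--     if count==1:
--         return x
--     elif 't' not in y:
--         x.append( "Pernicious")
--         return x
--     else:
--         return x
-- ===== SOURCE B (Python) =====
-- def how_bad(n):
--     count = n.bit_count()
--     out = ['Evil' if count % 2 == 0 else 'Odious']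
--     if count != 1:
--         i = 2
--         while i * i <= count:
--             if count % i == 0:
--                 break
--             i += 1
--         else:
--             out.append('Pernicious')
--     return out
-- ===== Notes on version B (the rewrite author's own statement) =====
-- stated objective: alternative
-- what changed: B gets the popcount from int.bit_count() instead of scanning the characters of bin(n), and tests primality of the count by early-exit trial division only up to sqrt(count) instead of building the full list of verdicts for every i in range(2, count).
import Mathlib
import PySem

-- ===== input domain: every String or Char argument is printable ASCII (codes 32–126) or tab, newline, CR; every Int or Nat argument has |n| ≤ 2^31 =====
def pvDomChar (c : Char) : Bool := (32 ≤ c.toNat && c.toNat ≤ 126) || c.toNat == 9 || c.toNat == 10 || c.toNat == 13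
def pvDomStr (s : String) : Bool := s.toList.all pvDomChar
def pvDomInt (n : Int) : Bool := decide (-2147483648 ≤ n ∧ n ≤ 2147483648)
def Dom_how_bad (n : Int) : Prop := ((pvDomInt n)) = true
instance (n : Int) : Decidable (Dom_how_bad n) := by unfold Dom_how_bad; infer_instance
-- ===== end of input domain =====

-- B reads the popcount off int.bit_count() and tests its primality by trial division up to sqrt(count) with an early-exit loop, instead of scanning bin(n)'s characters and enumerating all of range(2, count); objective: alternative (less work per call, unmeasurable at these sizes).


-- ===== PORT A =====
-- literal transliteration of A: a = bin(n); count the '1' characters of str(a) (= a) with a fold;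
-- x = single parity label; y = ['t'/'f' for i in range(2, count)]; branch exactly as A does.
def how_bad (n : Int) : List String :=
  let a := PySem.Int.pyBin n
  let count := a.toList.foldl (fun c i => if i == '1' then c + 1 else c) (0 : Int)
  let x := [if PySem.Int.mod count 2 = 0 then "Evil" else "Odious"]
  let y := (PySem.List.pyRange 2 count 1).map
    (fun i => if PySem.Int.mod count i = 0 then "t" else "f")
  if count = 1 then x
  else if ¬ ("t" ∈ y) then x ++ ["Pernicious"]
  else x

-- ===== PORT B =====
-- B's 'i = 2; while i*i <= count: if count % i == 0: break; i += 1' loop; true = a divisor was found (the break fired)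
def how_bad_trial (count : Nat) (i : Nat) : Bool :=
  if i * i ≤ count then
    if count % i = 0 then true else how_bad_trial count (i + 1)
  else false
termination_by count + 1 - i
decreasing_by
  rcases Nat.eq_zero_or_pos i with h0 | h0
  · omega
  · have : i ≤ i * i := Nat.le_mul_of_pos_left i h0
    omega

-- literal transliteration of Source B (the while/else becomes how_bad_trial)
def how_bad_alt (n : Int) : List String :=
  let count := PySem.Int.bitCount n
  let out := [if count % 2 = 0 then "Evil" else "Odious"]
  if count ≠ 1 then
    if how_bad_trial count 2 then out else out ++ ["Pernicious"]
  else out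

-- ===== PRECONDITION & SPEC =====
def Spec_how_bad (n : Int) (out : List String) : Prop := out = how_bad_alt n
instance (n : Int) (out : List String) : Decidable (Spec_how_bad n out) := by unfold Spec_how_bad; infer_instance

-- ===== CLAIM (what is proved, stated in full; the proofs are below) =====
def Claim_equal_how_bad : Prop := ∀ (n : Int), Dom_how_bad n → Spec_how_bad n (how_bad n)

-- ===== LEMMAS AND PROOFS =====

lemma bitCount_one : PySem.Int.bitCount (1 : Int) = 1 := by decide

-- counting the '1' characters of Nat.toDigits-style binary output is exactly the bit count
lemma toDigitsCore_count (fuel : Nat) : ∀ (n : Nat) (ds : List Char), n ≤ fuel →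
    (Nat.toDigitsCore 2 (fuel + 1) n ds).count '1'
      = PySem.Int.bitCount (n : Int) + ds.count '1' := by
  induction fuel with
  | zero =>
    intro n ds h
    interval_cases n
    simp [Nat.toDigitsCore, Nat.digitChar, PySem.Int.bitCount_zero]
  | succ fuel ih =>
    intro n ds h
    show (Nat.toDigitsCore 2 (fuel + 1 + 1) n ds).count '1' = _
    rw [Nat.toDigitsCore]
    by_cases h2 : n / 2 = 0
    · simp only [h2, if_pos]
      have : n ≤ 1 := by omega
      interval_cases n <;>
        (simp [Nat.digitChar, PySem.Int.bitCount_zero, bitCount_one] <;> omega)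
    · simp only [h2, if_false]
      rw [ih (n / 2) _ (by omega)]
      have hb := PySem.Int.bitCount_natCast (m := n) (by omega)
      rw [hb]
      rcases Nat.mod_two_eq_zero_or_one n with hm | hm <;>
        (simp [hm, Nat.digitChar] <;> omega)

lemma bitCount_natAbs (n : Int) :
    PySem.Int.bitCount ((n.natAbs : Nat) : Int) = PySem.Int.bitCount n := by
  simp only [PySem.Int.bitCount, Int.natAbs_natCast]

-- the number of '1' characters in bin(n) is n.bit_count()
lemma count_pyBin (n : Int) :
    (PySem.Int.pyBin n).toList.count '1' = PySem.Int.bitCount n := by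
  rw [PySem.Int.toList_pyBin]
  unfold PySem.Int.toBinChars0b
  split_ifs with h
  · have hd := toDigitsCore_count n.natAbs n.natAbs [] le_rfl
    unfold Nat.toDigits at *
    simp only [List.count_cons, List.count_nil] at *
    rw [hd, bitCount_natAbs]
    simp
  · have hd := toDigitsCore_count n.toNat n.toNat [] le_rfl
    unfold Nat.toDigits at *
    simp only [List.count_cons, List.count_nil] at *
    rw [hd]
    have ht : n.toNat = n.natAbs := by omega
    rw [ht, bitCount_natAbs]
    simp

-- A's counting fold over the characters of bin(n)
lemma countA_eq (n : Int) :
    (PySem.Int.pyBin n).toList.foldl (fun c i => if i == '1' then c + 1 else c) (0 : Int)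
      = ((PySem.Int.bitCount n : Nat) : Int) := by
  rw [PySem.List.foldl_count_if]
  rw [show List.countP (fun i => i == '1') (PySem.Int.pyBin n).toList
      = (PySem.Int.pyBin n).toList.count '1' from rfl]
  rw [count_pyBin]
  simp

-- on the domain |n| ≤ 2^31 the popcount is at most 32
lemma bitCount_le_32 (n : Int) (hd : n.natAbs ≤ 2 ^ 31) : PySem.Int.bitCount n ≤ 32 := by
  rcases eq_or_ne n 0 with h0 | h0
  · subst h0; simp [PySem.Int.bitCount_zero]
  · have h1 := PySem.Int.two_pow_bitLength_le n h0
    have h2 : PySem.Int.bitLength n - 1 ≤ 31 := by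
      by_contra hgt
      have : (2 : Nat) ^ 32 ≤ 2 ^ (PySem.Int.bitLength n - 1) :=
        Nat.pow_le_pow_right (by norm_num) (by omega)
      omega
    have h3 := PySem.Int.bitCount_le_bitLength n
    have h4 : 1 ≤ PySem.Int.bitLength n := by
      by_contra hb
      have hL : PySem.Int.bitLength n = 0 := by omega
      have := PySem.Int.lt_two_pow_bitLength n
      rw [hL] at this
      simp at this
      omega
    omega

-- structural (fuel) twin of how_bad_trial, so the kernel can evaluate it under `decide`
def trialFuel (count i : Nat) : Nat → Bool
  | 0 => false
  | fuel + 1 =>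
    if i * i ≤ count then
      (if count % i = 0 then true else trialFuel count (i + 1) fuel)
    else false

lemma trial_eq_fuel : ∀ (fuel count i : Nat), count + 1 - i ≤ fuel →
    how_bad_trial count i = trialFuel count i fuel := by
  intro fuel
  induction fuel with
  | zero =>
    intro count i h
    rw [how_bad_trial]
    have h1 : count < i := by omega
    have h2 : i ≤ i * i := Nat.le_mul_of_pos_left i (by omega)
    have : ¬ (i * i ≤ count) := by omega
    simp [trialFuel, this]
  | succ fuel ih =>
    intro count i h
    rw [how_bad_trial]
    simp only [trialFuel]
    split_ifs with h1 h2
    · rfl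
    · exact ih count (i + 1) (by omega)
    · rfl

-- both residual computations agree for every popcount value the domain allows
lemma key (c : Nat) (hc : c ≤ 32) :
    (let count := ((c : Nat) : Int)
     let x := [if PySem.Int.mod count 2 = 0 then "Evil" else "Odious"]
     let y := (PySem.List.pyRange 2 count 1).map
       (fun i => if PySem.Int.mod count i = 0 then "t" else "f")
     if count = 1 then x
     else if ¬ ("t" ∈ y) then x ++ ["Pernicious"]
     else x)
    = (let out := [if c % 2 = 0 then "Evil" else "Odious"]
       if c ≠ 1 then
         if how_bad_trial c 2 then out else out ++ ["Pernicious"]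
       else out) := by
  rw [trial_eq_fuel 33 c 2 (by omega)]
  revert hc; revert c
  decide

-- ===== VERDICT (by name: the statement is the Claim_ definition above) =====
theorem how_bad_spec : Claim_equal_how_bad := by
  intro n hd
  show how_bad n = how_bad_alt n
  have hdom : n.natAbs ≤ 2 ^ 31 := by
    unfold Dom_how_bad pvDomInt at hd
    simp only [decide_eq_true_eq] at hd
    omega
  have hc := bitCount_le_32 n hdom
  simp only [how_bad, how_bad_alt]
  rw [countA_eq n]
  generalize PySem.Int.bitCount n = c at hc ⊢
  exact key c hc
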